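-- pv_equiv track=rewrite | github.com/RajkumarYadav777/DSAlgo | STRINGS/SLIDING/max_sum_ascii.py | ascii_sum
-- ===== SOURCE A (Python) =====
-- def ascii_sum(s, k):
--     if len(s)< k:
--         return 0
--     cur_sum = 0
--     max_sum = 0
--     start_id = 0
--     end = 0
--     start = 0
--
--     while end < len(s):
--         cur_sum += ord(s[end])
--
--         if end-start+1 == k:
--             if cur_sum > max_sum:
--                 max_sum = cur_sum
--                 start_id = start
--
--             cur_sum -= ord(s[start])
--             start += 1
--         end += 1
--     return max_sum, s[start_id:start_id+k]
-- ===== SOURCE B (Python) =====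
-- def ascii_sum(s, k):
--     if len(s) < k:
--         return 0
--     prefix = [0]
--     total = 0
--     for ch in s:
--         total += ord(ch)
--         prefix.append(total)
--     max_sum = 0
--     start_id = 0
--     if k > 0:
--         for i in range(len(s) - k + 1):
--             window = prefix[i + k] - prefix[i]
--             if window > max_sum:
--                 max_sum = window
--                 start_id = i
--     return max_sum, s[start_id:start_id + k]
-- ===== Notes on version B (the rewrite author's own statement) =====
-- stated objective: faster
-- what changed: Replaces A's sliding-window loop with per-character window bookkeeping by a separately built prefix-sum table and a scan over window starts computing each window as P[i+k]-P[i].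
-- outside the precondition, e.g. on ascii_sum('ab', 5): A returns 0, B returns 0
import Mathlib
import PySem

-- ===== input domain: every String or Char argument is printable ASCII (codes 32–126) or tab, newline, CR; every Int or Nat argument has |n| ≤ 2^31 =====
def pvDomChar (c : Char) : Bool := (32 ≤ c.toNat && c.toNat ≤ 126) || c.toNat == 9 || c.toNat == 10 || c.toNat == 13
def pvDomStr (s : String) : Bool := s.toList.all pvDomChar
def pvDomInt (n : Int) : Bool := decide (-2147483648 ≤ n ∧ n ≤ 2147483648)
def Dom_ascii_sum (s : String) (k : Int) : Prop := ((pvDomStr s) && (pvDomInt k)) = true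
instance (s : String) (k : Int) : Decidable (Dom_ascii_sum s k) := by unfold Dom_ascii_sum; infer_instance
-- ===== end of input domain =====

-- B replaces A's sliding-window running sum by a prefix-sum table and a window-start scan (same O(n), measurably lower constant factor).

-- ===== PORT A =====
-- ord(c) for an ASCII character
def pvOrd (c : Char) : Int := (c.toNat : Int)

-- the while loop of A over index `end` (here e : Nat); start/sid are Python ints.
-- Indexing s[end] / s[start] is via getD: both indices are provably in range when reached
-- (0 ≤ start ≤ end < len), so this equals Python's indexing.
def loopA (L : List Int) (k : Int) (cur maxs sid start : Int) (e : Nat) : Int × Int :=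
  if _h : e < L.length then
    let cur' := cur + L.getD e 0
    if (e : Int) - start + 1 = k then
      let ms := if cur' > maxs then (cur', start) else (maxs, sid)
      loopA L k (cur' - L.getD start.toNat 0) ms.1 ms.2 (start + 1) (e + 1)
    else
      loopA L k cur' maxs sid start (e + 1)
  else (maxs, sid)
termination_by L.length - e

def ascii_sum (s : String) (k : Int) : Int × String :=
  if PySem.Str.len s < k then
    (0, "")  -- Python A returns the bare int 0 here (not a pair); excluded by Pre_
  else
    let r := loopA (s.toList.map pvOrd) k 0 0 0 0 0
    (r.1, PySem.Str.slice s (some r.2) (some (r.2 + k)))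

-- ===== PORT B =====
-- prefix-sum builder of B: running total, one cell appended per character
def prefixAuxB (t : Int) : List Char → List Int
  | [] => []
  | c :: rest => (t + pvOrd c) :: prefixAuxB (t + pvOrd c) rest

def ascii_sum_alt (s : String) (k : Int) : Int × String :=
  if PySem.Str.len s < k then
    (0, "")  -- Python B returns the bare int 0 here (not a pair); excluded by Pre_
  else
    let P : List Int := 0 :: prefixAuxB 0 s.toList
    let r :=
      if k > 0 then
        (PySem.List.pyRange 0 (PySem.Str.len s - k + 1) 1).foldl
          (fun (acc : Int × Int) i =>
            -- prefix[i + k], prefix[i]: both indices lie in [0, len(s)] here, so getD = Python's indexing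
            let w := P.getD (i + k).toNat 0 - P.getD i.toNat 0
            if w > acc.1 then (w, i) else acc)
          (0, 0)
      else (0, 0)
    (r.1, PySem.Str.slice s (some r.2) (some (r.2 + k)))

-- ===== PRECONDITION & SPEC =====
-- Pre_ excludes exactly the inputs with len(s) < k, on which A returns the bare int 0 — not a value of the declared pair type.
def Pre_ascii_sum (s : String) (k : Int) : Prop := k ≤ PySem.Str.len s
instance (s : String) (k : Int) : Decidable (Pre_ascii_sum s k) := by unfold Pre_ascii_sum; infer_instance

def pvWitness_ascii_sum : String × Int := ("abcab", 3)

def Spec_ascii_sum (s : String) (k : Int) (out : Int × String) : Prop := out = ascii_sum_alt s k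
instance (s : String) (k : Int) (out : Int × String) : Decidable (Spec_ascii_sum s k out) := by unfold Spec_ascii_sum; infer_instance

-- ===== CLAIM (what is proved, stated in full; the proofs are below) =====
def Claim_equal_ascii_sum : Prop := ∀ (s : String) (k : Int), Dom_ascii_sum s k → Pre_ascii_sum s k → Spec_ascii_sum s k (ascii_sum s k)

-- ===== LEMMAS AND PROOFS =====

-- window sum of length kn starting at i
def pvW (L : List Int) (kn i : Nat) : Int := ((L.drop i).take kn).sum

-- the common "keep the best window start" step
def pvStep (L : List Int) (kn : Nat) (acc : Int × Int) (i : Nat) : Int × Int :=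
  if pvW L kn i > acc.1 then (pvW L kn i, (i : Int)) else acc

-- A's loop never fires its window branch when k ≤ 0
theorem loopA_nonpos (L : List Int) (k : Int) (hk : k ≤ 0) :
    ∀ (e : Nat) (cur maxs sid : Int) (start : Int), 0 ≤ start → start ≤ (e : Int) →
      loopA L k cur maxs sid start e = (maxs, sid) := by
  suffices h : ∀ (d e : Nat), L.length - e ≤ d → ∀ (cur maxs sid : Int) (start : Int),
      0 ≤ start → start ≤ (e : Int) → loopA L k cur maxs sid start e = (maxs, sid) by
    intro e; exact h (L.length - e) e le_rfl
  intro d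
  induction d with
  | zero =>
    intro e he cur maxs sid start _ _
    rw [loopA]
    simp only [dif_neg (by omega : ¬ e < L.length)]
  | succ d ih =>
    intro e he cur maxs sid start h0 hse
    rw [loopA]
    by_cases hlt : e < L.length
    · simp only [dif_pos hlt]
      rw [if_neg (by omega)]
      exact ih (e + 1) (by omega) _ _ _ _ h0 (by push_cast; omega)
    · simp only [dif_neg hlt]

-- the main invariant of A's loop (k ≥ 1)
theorem loopA_inv (L : List Int) (k : Int) (kn : Nat) (hk : 1 ≤ k) (hkn : kn = k.toNat)
    (hklen : kn ≤ L.length) :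
    ∀ (e : Nat) (acc : Int × Int), e ≤ L.length →
      loopA L k (((L.drop (e + 1 - kn)).take (e - (e + 1 - kn))).sum) acc.1 acc.2
        (((e + 1 - kn : Nat) : Int)) e
      = (List.range' (e + 1 - kn) ((L.length + 1 - kn) - (e + 1 - kn))).foldl (pvStep L kn) acc := by
  have hkI : (kn : Int) = k := by rw [hkn]; omega
  have hkn1 : 1 ≤ kn := by omega
  suffices h : ∀ (d e : Nat), L.length - e ≤ d → ∀ (acc : Int × Int), e ≤ L.length →
      loopA L k (((L.drop (e + 1 - kn)).take (e - (e + 1 - kn))).sum) acc.1 acc.2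
        (((e + 1 - kn : Nat) : Int)) e
      = (List.range' (e + 1 - kn) ((L.length + 1 - kn) - (e + 1 - kn))).foldl (pvStep L kn) acc by
    intro e; exact h (L.length - e) e le_rfl
  intro d
  induction d with
  | zero =>
    intro e hd acc he
    have he' : e = L.length := by omega
    subst he'
    rw [loopA]
    simp only [dif_neg (lt_irrefl _)]
    have hz : (L.length + 1 - kn) - (L.length + 1 - kn) = 0 := by omega
    rw [hz]
    simp
  | succ d ih =>
    intro e hd acc he
    by_cases hlt : e < L.length
    · have hstle : e + 1 - kn ≤ e := by omega
      have hget_e : L.getD e 0 = L[e] := List.getD_eq_getElem L 0 hlt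
      have hcur' :
          ((L.drop (e + 1 - kn)).take (e - (e + 1 - kn))).sum + L.getD e 0
            = ((L.drop (e + 1 - kn)).take (e + 1 - (e + 1 - kn))).sum := by
        have h1 : e + 1 - (e + 1 - kn) = (e - (e + 1 - kn)) + 1 := by omega
        have h2 : (L.drop (e + 1 - kn))[e - (e + 1 - kn)]? = some L[e] := by
          rw [List.getElem?_drop]
          have h2' : (e + 1 - kn) + (e - (e + 1 - kn)) = e := by omega
          rw [h2']
          exact List.getElem?_eq_getElem (by omega)
        rw [h1, List.take_add_one, h2]
        simp [List.getD, List.getElem?_eq_getElem hlt]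
      rw [loopA]
      simp only [dif_pos hlt]
      by_cases htr : kn ≤ e + 1
      · -- window branch fires: (e : Int) - start + 1 = k
        have hcond : (e : Int) - ((e + 1 - kn : Nat) : Int) + 1 = k := by omega
        rw [if_pos hcond]
        -- the updated best pair is pvStep applied at e + 1 - kn
        have hw : ((L.drop (e + 1 - kn)).take (e - (e + 1 - kn))).sum + L.getD e 0
            = pvW L kn (e + 1 - kn) := by
          rw [hcur', pvW, show e + 1 - (e + 1 - kn) = kn from by omega]
        have hms :
            (if ((L.drop (e + 1 - kn)).take (e - (e + 1 - kn))).sum + L.getD e 0 > acc.1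
              then (((L.drop (e + 1 - kn)).take (e - (e + 1 - kn))).sum + L.getD e 0,
                    ((e + 1 - kn : Nat) : Int))
              else (acc.1, acc.2)) = pvStep L kn acc (e + 1 - kn) := by
          rw [pvStep, ← hw]
        -- the new running sum drops L[e + 1 - kn]
        have hstlt : e + 1 - kn < L.length := by omega
        have hget_st : L.getD ((e + 1 - kn : Nat) : Int).toNat 0 = L[e + 1 - kn] := by
          have htn : ((e + 1 - kn : Nat) : Int).toNat = e + 1 - kn := by omega
          rw [htn]; exact List.getD_eq_getElem L 0 hstlt
        have hdropcons : L.drop (e + 1 - kn) = L[e + 1 - kn] :: L.drop ((e + 1 - kn) + 1) :=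
          List.drop_eq_getElem_cons hstlt
        have hnewcur :
            (((L.drop (e + 1 - kn)).take (e - (e + 1 - kn))).sum + L.getD e 0)
                - L.getD ((e + 1 - kn : Nat) : Int).toNat 0
              = ((L.drop ((e + 1) + 1 - kn)).take ((e + 1) - ((e + 1) + 1 - kn))).sum := by
          rw [hcur', hget_st, hdropcons]
          have h3 : e + 1 - (e + 1 - kn) = ((e + 1) - ((e + 1 - kn) + 1)) + 1 := by omega
          rw [h3, List.take_succ_cons]
          have h4 : (e + 1 - kn) + 1 = (e + 1) + 1 - kn := by omega
          rw [h4]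
          simp
        rw [hms, hnewcur]
        have hcast : ((e + 1 - kn : Nat) : Int) + 1 = (((e + 1) + 1 - kn : Nat) : Int) := by omega
        rw [hcast]
        rw [ih (e + 1) (by omega) (pvStep L kn acc (e + 1 - kn)) (by omega)]
        -- fold the head element (e + 1 - kn) into the range
        have hcnt : (L.length + 1 - kn) - (e + 1 - kn)
            = (((L.length + 1 - kn) - ((e + 1) + 1 - kn)) + 1) := by omega
        rw [hcnt, List.range'_succ]
        have h5 : (e + 1 - kn) + 1 = (e + 1) + 1 - kn := by omega
        rw [h5, List.foldl_cons]
      · -- no window yet: start = 0 and e + 1 < kn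
        have hcond : ¬ ((e : Int) - ((e + 1 - kn : Nat) : Int) + 1 = k) := by omega
        rw [if_neg hcond]
        have hIH := ih (e + 1) (by omega) acc (by omega)
        have hst1 : (e + 1) + 1 - kn = e + 1 - kn := by omega
        rw [hst1] at hIH
        rw [← hcur'] at hIH
        exact hIH
    · have he' : e = L.length := by omega
      subst he'
      rw [loopA]
      simp only [dif_neg (lt_irrefl _)]
      have : (L.length + 1 - kn) - (L.length + 1 - kn) = 0 := by omega
      rw [this]
      simp

-- prefix cells of B
theorem prefixAuxB_getD (cs : List Char) :
    ∀ (t : Int) (j : Nat), j < cs.length →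
      (prefixAuxB t cs).getD j 0 = t + ((cs.take (j + 1)).map pvOrd).sum := by
  induction cs with
  | nil => intro t j hj; simp at hj
  | cons c rest ih =>
    intro t j hj
    cases j with
    | zero => simp [prefixAuxB]
    | succ j =>
      simp only [prefixAuxB, List.getD_cons_succ, List.take_succ_cons, List.map_cons,
        List.sum_cons]
      rw [ih _ j (by simpa using hj)]
      ring

theorem prefixB_getD (cs : List Char) (j : Nat) (hj : j ≤ cs.length) :
    (0 :: prefixAuxB 0 cs).getD j 0 = ((cs.map pvOrd).take j).sum := by
  cases j with
  | zero => simp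
  | succ j =>
    rw [List.getD_cons_succ, prefixAuxB_getD cs 0 j (by omega), ← List.map_take]
    simp

-- ===== VERDICT (by name: the statement is the Claim_ definition above) =====
theorem ascii_sum_spec : Claim_equal_ascii_sum := by
  intro s k _dom hpre
  unfold Pre_ascii_sum at hpre
  rw [PySem.Str.len_eq] at hpre
  unfold Spec_ascii_sum ascii_sum ascii_sum_alt
  rw [PySem.Str.len_eq]
  have hguard : ¬ ((s.toList.length : Int) < k) := by omega
  rw [if_neg hguard, if_neg hguard]
  by_cases hk : 1 ≤ k
  · -- k ≥ 1: both sides compute the best-window fold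
    have hlenL : (s.toList.map pvOrd).length = s.toList.length := List.length_map ..
    have hklen : k.toNat ≤ (s.toList.map pvOrd).length := by rw [hlenL]; omega
    -- A's loop is the fold of pvStep over all window starts
    have hA := loopA_inv (s.toList.map pvOrd) k k.toNat hk rfl hklen 0 (0, 0) (by omega)
    rw [show 0 + 1 - k.toNat = 0 from by omega] at hA
    simp only [List.drop_zero, List.take_zero, List.sum_nil, Nat.cast_zero, Nat.sub_zero] at hA
    -- B's fold is the same fold
    have hB : (PySem.List.pyRange 0 ((s.toList.length : Int) - k + 1) 1).foldl
        (fun (acc : Int × Int) i =>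
          let w := (0 :: prefixAuxB 0 s.toList).getD (i + k).toNat 0
                    - (0 :: prefixAuxB 0 s.toList).getD i.toNat 0
          if w > acc.1 then (w, i) else acc) (0, 0)
        = (List.range' 0 ((s.toList.map pvOrd).length + 1 - k.toNat)).foldl
            (pvStep (s.toList.map pvOrd) k.toNat) (0, 0) := by
      rw [PySem.List.pyRange_one]
      have hcnt : (((s.toList.length : Int) - k + 1) - 0).toNat
          = (s.toList.map pvOrd).length + 1 - k.toNat := by rw [hlenL]; omega
      rw [hcnt, List.range_eq_range', List.foldl_map]
      apply PySem.List.foldl_congr_mem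
      intro acc j hj
      have hjlt : j < (s.toList.map pvOrd).length + 1 - k.toNat := by
        have := List.mem_range'_1.mp hj
        omega
      have hjk : j + k.toNat ≤ s.toList.length := by omega
      have ht1 : ((0 : Int) + (j : Int) + k).toNat = j + k.toNat := by omega
      have ht2 : ((0 : Int) + (j : Int)).toNat = j := by omega
      simp only [ht1, ht2]
      rw [prefixB_getD s.toList (j + k.toNat) hjk, prefixB_getD s.toList j (by omega)]
      have hwin : ((s.toList.map pvOrd).take (j + k.toNat)).sum
            - ((s.toList.map pvOrd).take j).sum
          = pvW (s.toList.map pvOrd) k.toNat j := by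
        rw [pvW, List.take_add, List.sum_append]
        ring
      rw [hwin, pvStep]
      have hz : (0 : Int) + (j : Int) = (j : Int) := by omega
      rw [hz]
    simp only [hA, if_pos (by omega : k > 0), hB]
  · -- k ≤ 0: A's window branch never fires, B skips the scan
    have hA := loopA_nonpos (s.toList.map pvOrd) k (by omega) 0 0 0 0 0 le_rfl (by simp)
    simp only [hA, if_neg (by omega : ¬ k > 0)]
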